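-- pv_equiv track=rewrite | github.com/MrBrantCode/unitest_baseline | mut_generate/mist_train_taco/taco_58/solution.py | calculate_expected_operations
-- ===== SOURCE A (Python) =====
-- MOD = 998244353
--
-- def calculate_expected_operations(N, A):
--     NN = 1 << N
--
--     def fwht(a):
--         i = 1
--         while i < NN:
--             j = 0
--             while j < NN:
--                 for k in range(i):
--                     (x, y) = (a[j + k], a[i + j + k])
--                     (a[j + k], a[i + j + k]) = ((x + y) % MOD, (x - y) % MOD)
--                 j += i << 1
--             i <<= 1
--
--     def inv(x):
--         return pow(x, MOD - 2, MOD)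
--
--     s = inv(sum(A) % MOD)
--     for i in range(NN):
--         A[i] = A[i] * s % MOD
--     A[0] = (A[0] - 1) % MOD
--     fwht(A)
--
--     B = [-1] * NN
--     B[0] = (NN - 1) % MOD
--     fwht(B)
--
--     C = [inv(A[i]) * B[i] % MOD for i in range(NN)]
--     fwht(C)
--
--     for i in range(NN):
--         C[i] = C[i] * inv(NN) % MOD
--
--     result = [(C[i] - C[0]) % MOD for i in range(NN)]
--     return result
-- ===== SOURCE B (Python) =====
-- MOD = 998244353
--
-- def _fwht_rec(a):
--     if len(a) == 1:
--         return a[:]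
--     h = len(a) // 2
--     L = _fwht_rec(a[:h])
--     R = _fwht_rec(a[h:])
--     return [(x + y) % MOD for x, y in zip(L, R)] + [(x - y) % MOD for x, y in zip(L, R)]
--
-- def calculate_expected_operations(N, A):
--     nn = 1 << N
--     s = pow(sum(A) % MOD, MOD - 2, MOD)
--     a = [A[i] * s % MOD for i in range(nn)]
--     a[0] = (a[0] - 1) % MOD
--     fa = _fwht_rec(a)
--     fb = _fwht_rec([(nn - 1) % MOD] + [-1] * (nn - 1))
--     fc = _fwht_rec([pow(x, MOD - 2, MOD) * y % MOD for x, y in zip(fa, fb)])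
--     inv_nn = pow(nn, MOD - 2, MOD)
--     c0 = fc[0] * inv_nn % MOD
--     return [(x * inv_nn % MOD - c0) % MOD for x in fc]
-- ===== Notes on version B (the rewrite author's own statement) =====
-- stated objective: alternative
-- what changed: The iterative in-place triple-loop butterfly FWHT is replaced by a pure recursive divide-and-conquer FWHT on list halves, and the surrounding scaling/inverse pipeline is rewritten with comprehensions and zips over fresh lists instead of in-place index assignments (B does not mutate the argument list; return values are identical).
import Mathlib
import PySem

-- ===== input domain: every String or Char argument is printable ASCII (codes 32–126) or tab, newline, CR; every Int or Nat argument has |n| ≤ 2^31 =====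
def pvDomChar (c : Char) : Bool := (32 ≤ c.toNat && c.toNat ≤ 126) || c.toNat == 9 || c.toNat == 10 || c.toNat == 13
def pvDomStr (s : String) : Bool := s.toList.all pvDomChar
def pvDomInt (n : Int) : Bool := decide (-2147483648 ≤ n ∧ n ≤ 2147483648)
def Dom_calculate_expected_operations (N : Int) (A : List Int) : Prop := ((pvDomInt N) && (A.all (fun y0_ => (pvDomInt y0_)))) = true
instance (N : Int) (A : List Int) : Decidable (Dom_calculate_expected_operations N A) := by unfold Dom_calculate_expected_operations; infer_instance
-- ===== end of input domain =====

-- B replaces the iterative in-place butterfly FWHT by a pure recursive divide-and-conquer FWHT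
-- and rewrites the surrounding pipeline with maps/zips over fresh lists (alternative decomposition,
-- same cost). A mutates its argument list in place, B does not: the equivalence proved here is
-- about the RETURN value only.

-- ===== PORT A =====
def pvMOD : Int := 998244353

-- pow(b, e, m): binary exponentiation, exact for b ≥ 0, m > 0 (all calls here have 0 ≤ b < m = pvMOD)
def pvPowMod (b : Int) (e : Nat) (m : Int) : Int :=
  if h : e = 0 then 1 % m
  else
    let r := pvPowMod b (e / 2) m
    if e % 2 = 0 then r * r % m
    else r * r % m * (b % m) % m
termination_by e
decreasing_by exact Nat.div_lt_self (Nat.pos_of_ne_zero h) (by omega)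

-- `for k in range(i)` body of fwht; getD is exact here: Pre_ keeps every index in range
-- (on an out-of-range index Python raises IndexError).
def fwhtK (i j : Nat) (a : List Int) : List Int :=
  (List.range i).foldl (fun a k =>
    let x := a.getD (j + k) 0
    let y := a.getD (i + j + k) 0
    (a.set (j + k) ((x + y) % pvMOD)).set (i + j + k) ((x - y) % pvMOD)) a

-- `while j < NN: … ; j += i << 1` (the 0 < i conjunct only makes the recursion total; Python reaches
-- this loop with i ≥ 1 always)
def fwhtJ (nn i j : Nat) (a : List Int) : List Int :=
  if h : j < nn ∧ 0 < i then fwhtJ nn i (j + (i <<< 1)) (fwhtK i j a) else a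
termination_by nn - j
decreasing_by simp only [Nat.shiftLeft_eq] at *; omega

-- `i = 1; while i < NN: … ; i <<= 1`
def fwhtLoop (nn i : Nat) (a : List Int) : List Int :=
  if h : i < nn ∧ 0 < i then fwhtLoop nn (i <<< 1) (fwhtJ nn i 0 a) else a
termination_by nn - i
decreasing_by simp only [Nat.shiftLeft_eq] at *; omega

def calculate_expected_operations (N : Int) (A : List Int) : List Int :=
  let nn : Nat := 1 <<< N.toNat   -- NN = 1 << N; Pre_ gives 0 ≤ N
  let s := pvPowMod (A.sum % pvMOD) (pvMOD - 2).toNat pvMOD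
  let A1 := (List.range nn).foldl (fun a i => a.set i (a.getD i 0 * s % pvMOD)) A
  let A2 := A1.set 0 ((A1.getD 0 0 - 1) % pvMOD)
  let FA := fwhtLoop nn 1 A2
  let B1 := (List.replicate nn (-1 : Int)).set 0 (((nn : Int) - 1) % pvMOD)
  let FB := fwhtLoop nn 1 B1
  let C := (List.range nn).map (fun idx =>
    pvPowMod (FA.getD idx 0) (pvMOD - 2).toNat pvMOD * FB.getD idx 0 % pvMOD)
  let FC := fwhtLoop nn 1 C
  let FC2 := (List.range nn).foldl (fun c idx =>
    c.set idx (c.getD idx 0 * pvPowMod ((nn : Int)) (pvMOD - 2).toNat pvMOD % pvMOD)) FC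
  (List.range nn).map (fun idx => (FC2.getD idx 0 - FC2.getD 0 0) % pvMOD)

-- ===== PORT B =====
-- recursive divide-and-conquer FWHT; guard `length ≤ 1` instead of Python's `== 1` only to make the
-- recursion total (the pipeline never calls it on [])
def fwhtRec (a : List Int) : List Int :=
  if h : a.length ≤ 1 then a
  else
    let hf := a.length / 2
    let L := fwhtRec (a.take hf)
    let R := fwhtRec (a.drop hf)
    List.zipWith (fun x y => (x + y) % pvMOD) L R ++ List.zipWith (fun x y => (x - y) % pvMOD) L R
termination_by a.length
decreasing_by
  · simp only [List.length_take]; omega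
  · simp only [List.length_drop]; omega

def calculate_expected_operations_alt (N : Int) (A : List Int) : List Int :=
  let nn : Nat := 1 <<< N.toNat
  let s := pvPowMod (A.sum % pvMOD) (pvMOD - 2).toNat pvMOD
  let a0 := (A.take nn).map (fun x => x * s % pvMOD)
  let a := a0.set 0 ((a0.getD 0 0 - 1) % pvMOD)
  let fa := fwhtRec a
  let fb := fwhtRec ((((nn : Int) - 1) % pvMOD) :: List.replicate (nn - 1) (-1))
  let fc := fwhtRec (List.zipWith (fun x y => pvPowMod x (pvMOD - 2).toNat pvMOD * y % pvMOD) fa fb)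
  let invnn := pvPowMod ((nn : Int)) (pvMOD - 2).toNat pvMOD
  let c0 := fc.getD 0 0 * invnn % pvMOD
  fc.map (fun x => (x * invnn % pvMOD - c0) % pvMOD)

-- ===== PRECONDITION & SPEC =====
-- Pre_ excludes exactly the inputs where A raises: N < 0 (ValueError on 1 << N) and lists shorter
-- than 2^N (IndexError on A[i]); 2^N ≤ len A is phrased through Nat.log2 so it is cheap to decide.
def Pre_calculate_expected_operations (N : Int) (A : List Int) : Prop :=
  0 ≤ N ∧ A ≠ [] ∧ N.toNat ≤ Nat.log2 A.length
instance (N : Int) (A : List Int) : Decidable (Pre_calculate_expected_operations N A) := by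
  unfold Pre_calculate_expected_operations; infer_instance

def pvWitness_calculate_expected_operations : Int × List Int := (1, [3, 4])

def Spec_calculate_expected_operations (N : Int) (A : List Int) (out : List Int) : Prop := out = calculate_expected_operations_alt N A
instance (N : Int) (A : List Int) (out : List Int) : Decidable (Spec_calculate_expected_operations N A out) := by unfold Spec_calculate_expected_operations; infer_instance

-- ===== CLAIM (what is proved, stated in full; the proofs are below) =====
def Claim_equal_calculate_expected_operations : Prop := ∀ (N : Int) (A : List Int), Dom_calculate_expected_operations N A → Pre_calculate_expected_operations N A → Spec_calculate_expected_operations N A (calculate_expected_operations N A)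

-- ===== LEMMAS AND PROOFS =====

-- proof-only abbreviations for the two butterfly combiners
def zA (L R : List Int) : List Int := List.zipWith (fun x y => (x + y) % pvMOD) L R
def zS (L R : List Int) : List Int := List.zipWith (fun x y => (x - y) % pvMOD) L R

-- one pass of butterflies at distance i, block by block
def stageR (i : Nat) (a : List Int) : List Int :=
  if h : a = [] ∨ i = 0 then a
  else
    zA (a.take i) ((a.drop i).take i) ++
      (zS (a.take i) ((a.drop i).take i) ++ stageR i (a.drop (2 * i)))
termination_by a.length
decreasing_by
  simp only [List.length_drop]
  rcases a with _ | ⟨x, xs⟩ <;> simp_all <;> omega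

theorem stageR_nil (i : Nat) : stageR i [] = [] := by
  unfold stageR; simp

theorem zA_take_succ (L R : List Int) (m : Nat) (hmL : m < L.length) (hmR : m < R.length) :
    zA (L.take (m + 1)) (R.take (m + 1)) = zA (L.take m) (R.take m) ++ [(L[m] + R[m]) % pvMOD] := by
  rw [List.take_succ_eq_append_getElem hmL, List.take_succ_eq_append_getElem hmR]
  unfold zA
  rw [List.zipWith_append (by simp; omega)]
  rfl

theorem zS_take_succ (L R : List Int) (m : Nat) (hmL : m < L.length) (hmR : m < R.length) :
    zS (L.take (m + 1)) (R.take (m + 1)) = zS (L.take m) (R.take m) ++ [(L[m] - R[m]) % pvMOD] := by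
  rw [List.take_succ_eq_append_getElem hmL, List.take_succ_eq_append_getElem hmR]
  unfold zS
  rw [List.zipWith_append (by simp; omega)]
  rfl

theorem fwhtK_spec (i : Nat) (p L R s : List Int) (hL : L.length = i) (hR : R.length = i) :
    fwhtK i p.length (p ++ (L ++ (R ++ s))) = p ++ (zA L R ++ (zS L R ++ s)) := by
  have key : ∀ m, m ≤ i →
      (List.range m).foldl (fun a k =>
        (a.set (p.length + k) ((a.getD (p.length + k) 0 + a.getD (i + p.length + k) 0) % pvMOD)).set
          (i + p.length + k) ((a.getD (p.length + k) 0 - a.getD (i + p.length + k) 0) % pvMOD))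
        (p ++ (L ++ (R ++ s)))
        = p ++ ((zA (L.take m) (R.take m) ++ L.drop m) ++ ((zS (L.take m) (R.take m) ++ R.drop m) ++ s)) := by
    intro m hm
    induction m with
    | zero => simp [zA, zS]
    | succ m ih =>
      have hmi : m < i := by omega
      have hmL : m < L.length := by omega
      have hmR : m < R.length := by omega
      rw [List.range_succ, List.foldl_append, ih (by omega)]
      simp only [List.foldl_cons, List.foldl_nil]
      set X := zA (L.take m) (R.take m) ++ L.drop m with hX
      set Y := zS (L.take m) (R.take m) ++ R.drop m with hY
      have hzA : (zA (L.take m) (R.take m)).length = m := by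
        simp [zA]; omega
      have hzS : (zS (L.take m) (R.take m)).length = m := by
        simp [zS]; omega
      have hXlen : X.length = i := by simp [hX, hzA]; omega
      have hYlen : Y.length = i := by simp [hY, hzS]; omega
      -- the two reads
      have hdropL : L.drop m = L[m] :: L.drop (m + 1) := List.drop_eq_getElem_cons hmL
      have hdropR : R.drop m = R[m] :: R.drop (m + 1) := List.drop_eq_getElem_cons hmR
      have hgx : (p ++ (X ++ (Y ++ s))).getD (p.length + m) 0 = L[m] := by
        rw [List.getD_append_right _ _ _ _ (by omega), Nat.add_sub_cancel_left,
          List.getD_append _ _ _ _ (by omega), hX,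
          List.getD_append_right _ _ _ _ (by omega), hzA, Nat.sub_self, hdropL]
        rfl
      have hgy : (p ++ (X ++ (Y ++ s))).getD (i + p.length + m) 0 = R[m] := by
        have e1 : i + p.length + m - p.length = i + m := by omega
        rw [List.getD_append_right _ _ _ _ (by omega), e1,
          List.getD_append_right _ _ _ _ (by omega), hXlen, Nat.add_sub_cancel_left,
          List.getD_append _ _ _ _ (by omega), hY,
          List.getD_append_right _ _ _ _ (by omega), hzS, Nat.sub_self, hdropR]
        rfl
      rw [hgx, hgy]
      -- the two writes
      have hsetX : (p ++ (X ++ (Y ++ s))).set (p.length + m) ((L[m] + R[m]) % pvMOD)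
          = p ++ ((zA (L.take (m + 1)) (R.take (m + 1)) ++ L.drop (m + 1)) ++ (Y ++ s)) := by
        rw [List.set_append_right _ _ (by omega), Nat.add_sub_cancel_left,
          List.set_append_left _ _ (by omega), hX,
          List.set_append_right _ _ (by omega)]
        rw [hzA, Nat.sub_self, hdropL, List.set_cons_zero, zA_take_succ L R m hmL hmR]
        simp only [List.append_assoc, List.cons_append, List.nil_append]
      rw [hsetX]
      set X' := zA (L.take (m + 1)) (R.take (m + 1)) ++ L.drop (m + 1) with hX'
      have hX'len : X'.length = i := by
        simp [hX', zA]; omega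
      have hsetY : (p ++ (X' ++ (Y ++ s))).set (i + p.length + m) ((L[m] - R[m]) % pvMOD)
          = p ++ (X' ++ ((zS (L.take (m + 1)) (R.take (m + 1)) ++ R.drop (m + 1)) ++ s)) := by
        have e1 : i + p.length + m - p.length = i + m := by omega
        rw [List.set_append_right _ _ (by omega), e1,
          List.set_append_right _ _ (by omega), hX'len, Nat.add_sub_cancel_left,
          List.set_append_left _ _ (by omega), hY,
          List.set_append_right _ _ (by omega)]
        rw [hzS, Nat.sub_self, hdropR, List.set_cons_zero, zS_take_succ L R m hmL hmR]
        simp only [List.append_assoc, List.cons_append, List.nil_append]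
      rw [hsetY]
  have := key i le_rfl
  simp only [List.take_of_length_le (le_of_eq hL), List.take_of_length_le (le_of_eq hR),
    List.drop_of_length_le (le_of_eq hL), List.drop_of_length_le (le_of_eq hR),
    List.append_nil] at this
  simpa [fwhtK] using this

theorem fwhtJ_spec (i : Nat) (hi : 0 < i) :
    ∀ (k : Nat) (a p t : List Int), a.length = 2 * i * k →
      fwhtJ (p.length + a.length) i p.length (p ++ (a ++ t)) = p ++ (stageR i a ++ t) := by
  intro k
  induction k with
  | zero =>
    intro a p t hlen
    have ha : a = [] := by simpa using List.length_eq_zero_iff.mp (by omega)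
    subst ha
    rw [fwhtJ]
    simp [stageR_nil]
  | succ k ih =>
    intro a p t hlen
    have hapos : 0 < a.length := by rw [hlen]; positivity
    have h2i : 2 * i ≤ a.length := by rw [hlen]; nlinarith
    set L := a.take i with hLdef
    set R := (a.drop i).take i with hRdef
    set rest := a.drop (2 * i) with hrestdef
    have hLlen : L.length = i := by simp [hLdef]; omega
    have hRlen : R.length = i := by simp [hRdef]; omega
    have hrestlen : rest.length = 2 * i * k := by simp [hrestdef]; ring_nf; ring_nf at hlen; omega
    have hdd : (a.drop i).drop i = a.drop (2 * i) := by
      rw [List.drop_drop]; congr 1; omega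
    have ha : a = L ++ (R ++ rest) := by
      conv_lhs => rw [← List.take_append_drop i a, ← List.take_append_drop i (a.drop i)]
      rw [hLdef, hRdef, hrestdef, ← hdd]
    rw [fwhtJ]
    rw [dif_pos ⟨by omega, hi⟩]
    have hshift : i <<< 1 = 2 * i := by rw [Nat.shiftLeft_eq]; ring
    have hassoc : p ++ (a ++ t) = p ++ (L ++ (R ++ (rest ++ t))) := by
      rw [ha]; simp [List.append_assoc]
    rw [hassoc, fwhtK_spec i p L R (rest ++ t) hLlen hRlen]
    have hzAlen : (zA L R).length = i := by simp [zA]; omega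
    have hzSlen : (zS L R).length = i := by simp [zS]; omega
    have hre : p ++ (zA L R ++ (zS L R ++ (rest ++ t)))
        = (p ++ (zA L R ++ zS L R)) ++ (rest ++ t) := by
      simp [List.append_assoc]
    have hplen : (p ++ (zA L R ++ zS L R)).length = p.length + 2 * i := by
      simp [hzAlen, hzSlen]; omega
    have hj : p.length + i <<< 1 = (p ++ (zA L R ++ zS L R)).length := by
      rw [hplen, hshift]
    have hnn : p.length + a.length = (p ++ (zA L R ++ zS L R)).length + rest.length := by
      rw [hplen, hrestlen, hlen]; ring
    rw [hre, hj, hnn, ih rest (p ++ (zA L R ++ zS L R)) t hrestlen]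
    have hane : ¬(a = [] ∨ i = 0) := by
      rintro (h | h)
      · rw [h] at hapos; simp at hapos
      · omega
    have hstage : stageR i a = zA L R ++ (zS L R ++ stageR i rest) := by
      rw [stageR, dif_neg hane]
    rw [hstage]
    simp [List.append_assoc]

theorem stageR_length (i : Nat) (hi : 0 < i) :
    ∀ (k : Nat) (a : List Int), a.length = 2 * i * k → (stageR i a).length = a.length := by
  intro k
  induction k with
  | zero =>
    intro a hlen
    have ha : a = [] := by simpa using List.length_eq_zero_iff.mp (by omega)
    subst ha; rw [stageR_nil]
  | succ k ih =>
    intro a hlen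
    have hapos : 0 < a.length := by rw [hlen]; positivity
    have hane : ¬(a = [] ∨ i = 0) := by
      rintro (h | h)
      · rw [h] at hapos; simp at hapos
      · omega
    rw [stageR, dif_neg hane]
    have h2i : 2 * i ≤ a.length := by rw [hlen]; nlinarith
    have hrest : (a.drop (2 * i)).length = 2 * i * k := by simp; ring_nf; ring_nf at hlen; omega
    have hzA : (zA (a.take i) ((a.drop i).take i)).length = i := by simp [zA]; omega
    have hzS : (zS (a.take i) ((a.drop i).take i)).length = i := by simp [zS]; omega
    simp only [List.length_append, ih _ hrest, hrest, hzA, hzS]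
    ring_nf
    ring_nf at hlen
    omega

theorem stageR_append (i : Nat) (hi : 0 < i) :
    ∀ (k : Nat) (x y : List Int), x.length = 2 * i * k → stageR i (x ++ y) = stageR i x ++ stageR i y := by
  intro k
  induction k with
  | zero =>
    intro x y hlen
    have hx : x = [] := by simpa using List.length_eq_zero_iff.mp (by omega)
    subst hx; simp [stageR_nil]
  | succ k ih =>
    intro x y hlen
    have hxpos : 0 < x.length := by rw [hlen]; positivity
    have hxi : 2 * i ≤ x.length := by rw [hlen]; nlinarith
    have hne1 : ¬(x ++ y = [] ∨ i = 0) := by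
      rintro (h | h)
      · rcases List.append_eq_nil_iff.mp h with ⟨hx, -⟩
        rw [hx] at hxpos; simp at hxpos
      · omega
    have hne2 : ¬(x = [] ∨ i = 0) := by
      rintro (h | h)
      · rw [h] at hxpos; simp at hxpos
      · omega
    conv_lhs => rw [stageR, dif_neg hne1]
    conv_rhs => rw [stageR, dif_neg hne2]
    have h1 : (x ++ y).take i = x.take i := List.take_append_of_le_length (by omega)
    have h2 : (x ++ y).drop i = x.drop i ++ y := List.drop_append_of_le_length (by omega)
    have h3 : (x.drop i ++ y).take i = (x.drop i).take i :=
      List.take_append_of_le_length (by simp; omega)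
    have h4 : (x ++ y).drop (2 * i) = x.drop (2 * i) ++ y :=
      List.drop_append_of_le_length (by omega)
    have hrest : (x.drop (2 * i)).length = 2 * i * k := by simp; ring_nf; ring_nf at hlen; omega
    rw [h1, h2, h3, h4, ih _ y hrest]
    simp [List.append_assoc]

theorem stageR_block (i : Nat) (L R : List Int) (hi : 0 < i) (hL : L.length = i) (hR : R.length = i) :
    stageR i (L ++ R) = zA L R ++ zS L R := by
  have hne : ¬(L ++ R = [] ∨ i = 0) := by
    rintro (h | h)
    · have := congrArg List.length h; simp [hL, hR] at this; omega
    · omega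
  rw [stageR, dif_neg hne]
  have h1 : (L ++ R).take i = L := by
    rw [List.take_append_of_le_length (by omega), List.take_of_length_le (by omega)]
  have h2 : (L ++ R).drop i = R := by
    rw [List.drop_append_of_le_length (by omega), List.drop_of_length_le (by omega)]
    simp
  have h4 : (L ++ R).drop (2 * i) = [] := by
    apply List.drop_of_length_le; simp; omega
  rw [h1, h2, h4, List.take_of_length_le (by omega), stageR_nil]
  simp

theorem fwhtRec_length : ∀ (n : Nat) (a : List Int), a.length = 2 ^ n →
    (fwhtRec a).length = a.length := by
  intro n
  induction n with
  | zero => intro a ha; rw [fwhtRec, dif_pos (by omega)]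
  | succ n ih =>
    intro a ha
    have hpow : (1 : Nat) ≤ 2 ^ n := Nat.one_le_two_pow
    have h2 : a.length / 2 = 2 ^ n := by rw [ha, pow_succ, Nat.mul_div_cancel _ (by omega)]
    rw [fwhtRec, dif_neg (by rw [ha, pow_succ]; omega)]
    have ih1 := ih (a.take (a.length / 2)) (by simp [h2]; rw [ha, pow_succ]; omega)
    have ih2 := ih (a.drop (a.length / 2)) (by simp [h2]; rw [ha, pow_succ]; omega)
    simp [ih1, ih2]
    rw [ha, pow_succ]
    omega

theorem fwhtJ_whole (i k nn : Nat) (hi : 0 < i) (a t : List Int) (ha : a.length = 2 * i * k)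
    (hnn : nn = a.length) : fwhtJ nn i 0 (a ++ t) = stageR i a ++ t := by
  have := fwhtJ_spec i hi k a [] t ha
  simpa [hnn] using this

theorem fwhtLoop_spec (n : Nat) : ∀ s, s ≤ n → ∀ L R t : List Int, L.length = 2 ^ n → R.length = 2 ^ n →
    fwhtLoop (2 ^ (n + 1)) (2 ^ s) (L ++ (R ++ t)) =
      stageR (2 ^ n) (fwhtLoop (2 ^ n) (2 ^ s) L ++ fwhtLoop (2 ^ n) (2 ^ s) R) ++ t := by
  have main : ∀ d s, s + d = n → ∀ L R t : List Int, L.length = 2 ^ n → R.length = 2 ^ n →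
      fwhtLoop (2 ^ (n + 1)) (2 ^ s) (L ++ (R ++ t)) =
        stageR (2 ^ n) (fwhtLoop (2 ^ n) (2 ^ s) L ++ fwhtLoop (2 ^ n) (2 ^ s) R) ++ t := by
    intro d
    induction d with
    | zero =>
      intro s hs L R t hL hR
      have hsn : s = n := by omega
      subst hsn
      rw [fwhtLoop, dif_pos ⟨Nat.pow_lt_pow_right one_lt_two (by omega), Nat.two_pow_pos s⟩]
      have hJ : fwhtJ (2 ^ (s + 1)) (2 ^ s) 0 ((L ++ R) ++ t) = stageR (2 ^ s) (L ++ R) ++ t := by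
        apply fwhtJ_whole (2 ^ s) 1 _ (Nat.two_pow_pos s)
        · simp [hL, hR]; try ring
        · simp [hL, hR, pow_succ]; try ring
      rw [List.append_assoc] at hJ
      rw [hJ]
      rw [fwhtLoop, dif_neg (by simp [Nat.shiftLeft_eq, pow_succ])]
      rw [fwhtLoop, dif_neg (by omega)]
      rw [fwhtLoop, dif_neg (by omega)]
    | succ d ih =>
      intro s hs L R t hL hR
      have hsn : s < n := by omega
      have hpos : 0 < 2 ^ s := Nat.two_pow_pos s
      rw [fwhtLoop, dif_pos ⟨Nat.pow_lt_pow_right one_lt_two (by omega), hpos⟩]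
      have hpow2 : (2 : Nat) ^ (n + 1) = 2 * 2 ^ s * 2 ^ (n - s) := by
        conv_lhs => rw [show n + 1 = 1 + s + (n - s) from by omega]
        rw [pow_add, pow_add, pow_one]
      have hk : (L ++ R).length = 2 * 2 ^ s * 2 ^ (n - s) := by
        simp [hL, hR]
        rw [← hpow2, pow_succ]
        ring
      have hJ : fwhtJ (2 ^ (n + 1)) (2 ^ s) 0 ((L ++ R) ++ t) = stageR (2 ^ s) (L ++ R) ++ t := by
        apply fwhtJ_whole (2 ^ s) (2 ^ (n - s)) _ hpos _ _ hk
        rw [hk]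
        exact hpow2
      rw [List.append_assoc] at hJ
      rw [hJ]
      have hkL : L.length = 2 * 2 ^ s * 2 ^ (n - s - 1) := by
        rw [hL]
        conv_lhs => rw [show n = s + 1 + (n - s - 1) from by omega]
        rw [pow_add, pow_add, pow_one]
        ring
      have hkR : R.length = 2 * 2 ^ s * 2 ^ (n - s - 1) := by rw [hR, ← hL, hkL]
      rw [stageR_append (2 ^ s) hpos (2 ^ (n - s - 1)) L R hkL]
      have hshift : 2 ^ s <<< 1 = 2 ^ (s + 1) := by
        rw [Nat.shiftLeft_eq, pow_one, ← pow_succ]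
      have hSL : (stageR (2 ^ s) L).length = 2 ^ n := by
        rw [stageR_length (2 ^ s) hpos (2 ^ (n - s - 1)) L hkL, hL]
      have hSR : (stageR (2 ^ s) R).length = 2 ^ n := by
        rw [stageR_length (2 ^ s) hpos (2 ^ (n - s - 1)) R hkR, hR]
      rw [List.append_assoc, hshift, ih (s + 1) (by omega) _ _ t hSL hSR]
      -- now unfold one step of the two inner loops on the RHS
      have hunf : ∀ X : List Int, X.length = 2 * 2 ^ s * 2 ^ (n - s - 1) →
          fwhtLoop (2 ^ n) (2 ^ s) X = fwhtLoop (2 ^ n) (2 ^ (s + 1)) (stageR (2 ^ s) X) := by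
        intro X hX
        rw [fwhtLoop, dif_pos ⟨Nat.pow_lt_pow_right one_lt_two (by omega), hpos⟩, hshift]
        congr 1
        have := fwhtJ_whole (2 ^ s) (2 ^ (n - s - 1)) (2 ^ n) hpos X [] hX (by rw [hX, ← hkL, hL])
        simpa using this
      rw [hunf L hkL, hunf R hkR]
  exact fun s hs => main (n - s) s (by omega)

theorem fwht_main : ∀ (n : Nat) (a t : List Int), a.length = 2 ^ n →
    fwhtLoop (2 ^ n) 1 (a ++ t) = fwhtRec a ++ t := by
  intro n
  induction n with
  | zero =>
    intro a t ha
    rw [fwhtLoop, dif_neg (by omega)]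
    rw [fwhtRec]
    rw [dif_pos (by omega)]
  | succ n ih =>
    intro a t ha
    have hpow : (1 : Nat) ≤ 2 ^ n := Nat.one_le_two_pow
    set L := a.take (2 ^ n) with hLdef
    set R := a.drop (2 ^ n) with hRdef
    have hL : L.length = 2 ^ n := by simp [hLdef, ha, pow_succ]; try omega
    have hR : R.length = 2 ^ n := by simp [hRdef, ha, pow_succ]; try omega
    have ha' : a = L ++ R := (List.take_append_drop _ a).symm
    have h1 : (1 : Nat) = 2 ^ 0 := rfl
    have step : fwhtLoop (2 ^ (n + 1)) 1 (a ++ t)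
        = stageR (2 ^ n) (fwhtLoop (2 ^ n) 1 L ++ fwhtLoop (2 ^ n) 1 R) ++ t := by
      rw [ha', List.append_assoc, h1]
      exact fwhtLoop_spec n 0 (Nat.zero_le n) L R t hL hR
    have hFL : fwhtLoop (2 ^ n) 1 L = fwhtRec L := by
      have := ih L [] hL
      simpa using this
    have hFR : fwhtLoop (2 ^ n) 1 R = fwhtRec R := by
      have := ih R [] hR
      simpa using this
    have hhf : a.length / 2 = 2 ^ n := by rw [ha, pow_succ, Nat.mul_div_cancel _ (by omega)]
    have hrec : fwhtRec a
        = List.zipWith (fun x y => (x + y) % pvMOD) (fwhtRec L) (fwhtRec R) ++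
            List.zipWith (fun x y => (x - y) % pvMOD) (fwhtRec L) (fwhtRec R) := by
      conv_lhs => rw [fwhtRec]
      rw [dif_neg (by rw [ha, pow_succ]; omega)]
      simp only [hhf, ← hLdef, ← hRdef]
    rw [step, hFL, hFR, stageR_block (2 ^ n) _ _ (by omega)
      (by rw [fwhtRec_length n L hL, hL]) (by rw [fwhtRec_length n R hR, hR]), hrec, zA, zS]

theorem foldl_set_scale (s : Int) : ∀ (nn : Nat) (A : List Int), nn ≤ A.length →
    (List.range nn).foldl (fun a i => a.set i (a.getD i 0 * s % pvMOD)) A =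
      (A.take nn).map (fun x => x * s % pvMOD) ++ A.drop nn := by
  intro nn
  induction nn with
  | zero => intro A h; simp
  | succ nn ih =>
    intro A h
    have hnn : nn < A.length := by omega
    rw [List.range_succ, List.foldl_append, ih A (by omega)]
    simp only [List.foldl_cons, List.foldl_nil]
    have hP : ((A.take nn).map (fun x => x * s % pvMOD)).length = nn := by simp; omega
    have hdrop : A.drop nn = A[nn] :: A.drop (nn + 1) := List.drop_eq_getElem_cons hnn
    have hget : ((A.take nn).map (fun x => x * s % pvMOD) ++ A.drop nn).getD nn 0 = A[nn] := by
      rw [List.getD_append_right _ _ _ _ (by omega), hP, Nat.sub_self, hdrop]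
      rfl
    rw [hget, List.set_append_right _ _ (by omega), hP, Nat.sub_self, hdrop,
      List.set_cons_zero, List.take_succ_eq_append_getElem hnn, List.map_append]
    simp

theorem map_range_C (x t y : List Int) (nn : Nat) (hx : x.length = nn) (hy : y.length = nn) :
    (List.range nn).map (fun idx =>
        pvPowMod ((x ++ t).getD idx 0) (pvMOD - 2).toNat pvMOD * (y.getD idx 0) % pvMOD)
      = List.zipWith (fun u v => pvPowMod u (pvMOD - 2).toNat pvMOD * v % pvMOD) x y := by
  apply List.ext_getElem
  · simp [hx, hy]
  · intro i h1 h2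
    have hi : i < nn := by simpa using h1
    simp only [List.getElem_map, List.getElem_range, List.getElem_zipWith]
    rw [List.getD_append _ _ _ _ (by omega), List.getD_eq_getElem _ _ (by omega),
      List.getD_eq_getElem _ _ (by omega)]

theorem map_range_final (q : Int) (fc : List Int) (nn : Nat) (hfc : fc.length = nn)
    (hpos : 0 < nn) :
    (List.range nn).map (fun idx => ((fc.map (fun x => x * q % pvMOD)).getD idx 0 -
        (fc.map (fun x => x * q % pvMOD)).getD 0 0) % pvMOD)
      = fc.map (fun x => (x * q % pvMOD - fc.getD 0 0 * q % pvMOD) % pvMOD) := by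
  apply List.ext_getElem
  · simp [hfc]
  · intro i h1 h2
    have hi : i < nn := by simpa using h1
    simp only [List.getElem_map, List.getElem_range]
    rw [List.getD_eq_getElem _ _ (by simp; omega), List.getD_eq_getElem _ _ (by simp; omega)]
    simp [List.getD, List.getElem?_eq_getElem (show 0 < fc.length by omega)]

-- ===== VERDICT (by name: the statement is the Claim_ definition above) =====
theorem calculate_expected_operations_spec : Claim_equal_calculate_expected_operations := by
  intro N A hD hPre
  obtain ⟨hN, hne, hlog⟩ := hPre
  unfold Spec_calculate_expected_operations
  have hlen0 : A.length ≠ 0 := by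
    intro h; exact hne (List.length_eq_zero_iff.mp h)
  have hlen : 2 ^ N.toNat ≤ A.length :=
    le_trans (Nat.pow_le_pow_right (by omega) hlog) (Nat.log2_self_le hlen0)
  have hpos : 0 < 2 ^ N.toNat := Nat.two_pow_pos N.toNat
  have hnn0 : (1 : Nat) <<< N.toNat = 2 ^ N.toNat := by rw [Nat.shiftLeft_eq, one_mul]
  simp only [calculate_expected_operations, calculate_expected_operations_alt, hnn0]
  set q := pvPowMod (A.sum % pvMOD) (pvMOD - 2).toNat pvMOD with hq
  rw [foldl_set_scale q (2 ^ N.toNat) A hlen]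
  set P := (A.take (2 ^ N.toNat)).map (fun x => x * q % pvMOD) with hP
  set T := A.drop (2 ^ N.toNat) with hT
  have hPlen : P.length = 2 ^ N.toNat := by rw [hP]; simp; exact hlen
  have hgd : (P ++ T).getD 0 0 = P.getD 0 0 := List.getD_append _ _ _ _ (by omega)
  have hst : ∀ v : Int, (P ++ T).set 0 v = P.set 0 v ++ T :=
    fun v => List.set_append_left _ _ (by omega)
  rw [hgd, hst]
  set a1 := P.set 0 ((P.getD 0 0 - 1) % pvMOD) with ha1def
  have ha1 : a1.length = 2 ^ N.toNat := by rw [ha1def]; simp [hPlen]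
  rw [fwht_main N.toNat a1 T ha1]
  have hrep : List.replicate (2 ^ N.toNat) (-1 : Int)
      = (-1 : Int) :: List.replicate (2 ^ N.toNat - 1) (-1) := by
    conv_lhs => rw [show 2 ^ N.toNat = (2 ^ N.toNat - 1) + 1 from by omega]
    rw [List.replicate_succ]
  rw [hrep, List.set_cons_zero]
  have hFw : ∀ b : List Int, b.length = 2 ^ N.toNat → fwhtLoop (2 ^ N.toNat) 1 b = fwhtRec b :=
    fun b hb => by simpa using fwht_main N.toNat b [] hb
  set b1 := (((2 ^ N.toNat : Nat) : Int) - 1) % pvMOD :: List.replicate (2 ^ N.toNat - 1) (-1 : Int)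
    with hb1def
  have hb1 : b1.length = 2 ^ N.toNat := by
    rw [hb1def]; simp [Nat.sub_add_cancel Nat.one_le_two_pow]
  rw [hFw b1 hb1]
  have hfa : (fwhtRec a1).length = 2 ^ N.toNat := by rw [fwhtRec_length N.toNat a1 ha1, ha1]
  have hfb : (fwhtRec b1).length = 2 ^ N.toNat := by rw [fwhtRec_length N.toNat b1 hb1, hb1]
  rw [map_range_C (fwhtRec a1) T (fwhtRec b1) (2 ^ N.toNat) hfa hfb]
  set C1 := List.zipWith (fun u v => pvPowMod u (pvMOD - 2).toNat pvMOD * v % pvMOD)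
    (fwhtRec a1) (fwhtRec b1) with hC1def
  have hC1 : C1.length = 2 ^ N.toNat := by rw [hC1def]; simp [hfa, hfb]
  rw [hFw C1 hC1]
  have hfc : (fwhtRec C1).length = 2 ^ N.toNat := by rw [fwhtRec_length N.toNat C1 hC1, hC1]
  rw [foldl_set_scale (pvPowMod ((2 ^ N.toNat : Nat) : Int) (pvMOD - 2).toNat pvMOD)
    (2 ^ N.toNat) (fwhtRec C1) (le_of_eq hfc.symm)]
  rw [List.take_of_length_le (le_of_eq hfc), List.drop_of_length_le (le_of_eq hfc),
    List.append_nil]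
  rw [map_range_final (pvPowMod ((2 ^ N.toNat : Nat) : Int) (pvMOD - 2).toNat pvMOD)
    (fwhtRec C1) (2 ^ N.toNat) hfc hpos]
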